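-- pv_equiv track=rewrite | github.com/ajue/llgame | scripts/common/Rules_DDZ.py | _assortCards
-- ===== SOURCE A (Python) =====
-- def _assortCards(cards):
--     """将手牌按lev分类"""
--     result = {}
--     for cc in cards:
--         lev = int((cc-1)/4)
--         if lev in result.keys():
--             result[lev].append(cc)
--         else:
--             result[lev] = [cc]
--     return result
-- ===== SOURCE B (Python) =====
-- def _assortCards(cards):
--     """将手牌按lev分类"""
--     levs = [int((cc - 1) / 4) for cc in cards]
--     return {k: [cc for cc, l in zip(cards, levs) if l == k]
--             for k in dict.fromkeys(levs)}
-- ===== Notes on version B (the rewrite author's own statement) =====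
-- stated objective: alternative
-- what changed: Replaces A's incremental dict insertion (one pass with per-card key test and append/insert) by a two-phase pipeline: precompute the level of every card, dedup the levels in first-seen order, then build each group by filtering the zipped card/level list per key.
import Mathlib
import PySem

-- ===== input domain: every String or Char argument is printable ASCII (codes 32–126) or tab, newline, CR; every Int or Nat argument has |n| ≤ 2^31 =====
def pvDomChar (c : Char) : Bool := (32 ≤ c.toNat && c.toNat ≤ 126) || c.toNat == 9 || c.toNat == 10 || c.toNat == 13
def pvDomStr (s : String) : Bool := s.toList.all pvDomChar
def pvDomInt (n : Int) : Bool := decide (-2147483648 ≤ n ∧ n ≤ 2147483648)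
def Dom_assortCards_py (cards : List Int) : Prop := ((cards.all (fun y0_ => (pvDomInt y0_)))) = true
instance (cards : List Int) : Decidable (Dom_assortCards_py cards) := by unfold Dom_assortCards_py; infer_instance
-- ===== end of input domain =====

-- B groups cards by level with a dedup-then-filter pipeline instead of A's incremental
-- dict insertion; same result (return-value equivalence), similar cost (alternative).

-- ===== PORT A =====
-- int((cc-1)/4): true division then int() truncates toward zero; exact for |cc| ≤ 2^31
-- (PySem.Int.truncdiv is int(a/b) for |a|,|b| < 2^53).
def assortCards_py (cards : List Int) : List (Int × List Int) :=
  (cards.foldl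
    (fun result cc =>
      let lev := PySem.Int.truncdiv (cc - 1) 4
      if lev ∈ result.keys then result.modify lev [] (fun v => v ++ [cc])
      else result.insert lev [cc])
    PySem.Dict.empty).items

-- ===== PORT B =====
def assortCards_py_alt (cards : List Int) : List (Int × List Int) :=
  let levs := cards.map (fun cc => PySem.Int.truncdiv (cc - 1) 4)
  (PySem.List.dedup levs).map
    (fun k => (k, ((cards.zip levs).filter (fun p => p.2 == k)).map (fun p => p.1)))

-- ===== PRECONDITION & SPEC =====
def Spec_assortCards_py (cards : List Int) (out : List (Int × List Int)) : Prop := out = assortCards_py_alt cards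
instance (cards : List Int) (out : List (Int × List Int)) : Decidable (Spec_assortCards_py cards out) := by unfold Spec_assortCards_py; infer_instance

-- ===== CLAIM (what is proved, stated in full; the proofs are below) =====
def Claim_equal_assortCards_py : Prop := ∀ (cards : List Int), Dom_assortCards_py cards → Spec_assortCards_py cards (assortCards_py cards)

-- ===== LEMMAS AND PROOFS =====

-- the level key
def pvLev (cc : Int) : Int := PySem.Int.truncdiv (cc - 1) 4

-- A's loop step is exactly a Dict.modify (a modify at a missing key inserts f [])
theorem pv_step_eq (d : PySem.Dict Int (List Int)) (cc : Int) :
    (if pvLev cc ∈ d.keys then d.modify (pvLev cc) [] (fun v => v ++ [cc])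
     else d.insert (pvLev cc) [cc]) = d.modify (pvLev cc) [] (fun v => v ++ [cc]) := by
  by_cases h : pvLev cc ∈ d.keys
  · simp [h]
  · have hc : d.contains (pvLev cc) = false := by
      simp [PySem.Dict.contains_eq_decide_mem_keys, h]
    simp [h, PySem.Dict.modify, PySem.Dict.getD_of_not_contains d [] hc]

-- the two loop bodies agree pointwise, so the folds agree (any start dict)
theorem pv_foldl_congr (cards : List Int) (d : PySem.Dict Int (List Int)) :
    cards.foldl
      (fun result cc =>
        let lev := PySem.Int.truncdiv (cc - 1) 4
        if lev ∈ result.keys then result.modify lev [] (fun v => v ++ [cc])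
        else result.insert lev [cc]) d
    = cards.foldl (fun d cc => d.modify (pvLev cc) [] (fun v => v ++ [cc])) d := by
  induction cards generalizing d with
  | nil => rfl
  | cons c cs ih =>
      simp only [List.foldl_cons, ih]
      exact congrArg
        (fun d' => cs.foldl (fun d cc => d.modify (pvLev cc) [] (fun v => v ++ [cc])) d')
        (pv_step_eq d c)

-- A's fold, written as the pure modify-loop
theorem pv_fold_eq (cards : List Int) :
    cards.foldl
      (fun result cc =>
        let lev := PySem.Int.truncdiv (cc - 1) 4
        if lev ∈ result.keys then result.modify lev [] (fun v => v ++ [cc])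
        else result.insert lev [cc])
      PySem.Dict.empty
    = cards.foldl (fun d cc => d.modify (pvLev cc) [] (fun v => v ++ [cc]))
        PySem.Dict.empty := pv_foldl_congr cards PySem.Dict.empty



-- lookup in the built dict = filter of the cards
theorem pv_getD (cards : List Int) (k : Int) :
    (cards.foldl (fun d cc => d.modify (pvLev cc) [] (fun v => v ++ [cc]))
        PySem.Dict.empty).getD k []
      = cards.filter (fun cc => pvLev cc == k) := by
  have h := PySem.Dict.getD_foldl_modify_append
      (cards.map (fun cc => (pvLev cc, cc))) (PySem.Dict.empty (κ := Int) (ν := List Int)) k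
  rw [List.foldl_map] at h
  simpa [List.filter_map, List.map_map, Function.comp_def] using h

-- B's per-key group = filter of the cards
theorem pv_zip_filter (cards : List Int) (k : Int) :
    ((cards.zip (cards.map pvLev)).filter (fun p => p.2 == k)).map (fun p => p.1)
      = cards.filter (fun cc => pvLev cc == k) := by
  induction cards with
  | nil => rfl
  | cons c cs ih =>
      cases hb : (pvLev c == k) <;> simp [List.filter, hb, ih]

theorem assortCards_py_spec : Claim_equal_assortCards_py := by
  intro cards _
  unfold Spec_assortCards_py assortCards_py assortCards_py_alt
  rw [pv_fold_eq]
  have hkeys :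
      (cards.foldl (fun d cc => d.modify (pvLev cc) [] (fun v => v ++ [cc]))
        PySem.Dict.empty).keys = PySem.Set.ofList (cards.map pvLev) := by
    have h := PySem.Dict.keys_foldl_modify_key cards pvLev [] (fun _ cc v => v ++ [cc])
        (PySem.Dict.empty (κ := Int) (ν := List Int))
    simpa [PySem.Dict.keys_empty] using h
  have hnd :
      (cards.foldl (fun d cc => d.modify (pvLev cc) [] (fun v => v ++ [cc]))
        PySem.Dict.empty).keys.Nodup :=
    PySem.Dict.nodup_keys_foldl_modify_key cards pvLev [] (fun _ cc v => v ++ [cc]) _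
      (by simp [PySem.Dict.keys_empty])
  rw [PySem.Dict.items_eq_map_keys _ hnd [], hkeys]
  show (PySem.Set.ofList (cards.map pvLev)).map
        (fun k => (k, (cards.foldl (fun d cc => d.modify (pvLev cc) [] (fun v => v ++ [cc]))
            PySem.Dict.empty).getD k []))
      = (PySem.List.dedup (cards.map pvLev)).map
        (fun k => (k, ((cards.zip (cards.map pvLev)).filter (fun p => p.2 == k)).map (fun p => p.1)))
  rw [PySem.List.dedup_eq_ofList]
  apply List.map_congr_left
  intro k _
  simp only [pv_getD, pv_zip_filter]

-- ===== VERDICT (by name: the statement is the Claim_ definition above) =====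
-- (verdict theorem assortCards_py_spec is stated and proved above)
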